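-- pv_equiv track=rewrite | github.com/quantumbagel/PlayCord | utils/conversion.py | player_representative
-- ===== SOURCE A (Python) =====
-- def player_representative(possible_players: list[int]):
--     """
--     Turns a list of players into a string representing the list of possible players
--     e.g. [2, 3, 4, 5] -> 2-5, [2,3,5] -> 2-3, 5
--     :param possible_players:
--     :return: string representing the the amount
--     """
--     if type(possible_players) == int:
--         return str(possible_players)
--     nums = sorted(set(possible_players))
--
--     result = []
--     start = nums[0]
--     for i in range(1, len(nums) + 1):
--         # Check if the current number is not consecutive
--         if i == len(nums) or nums[i] != nums[i - 1] + 1: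
--             # If there's a range (start != nums[i-1]), add range, else just a single number
--             if start == nums[i - 1]:
--                 result.append(str(start))
--             else:
--                 result.append(f"{start}-{nums[i - 1]}")
--             if i < len(nums):
--                 start = nums[i]
--
--     return ", ".join(result)
-- ===== SOURCE B (Python) =====
-- def player_representative(possible_players: list[int]):
--     if type(possible_players) == int:
--         return str(possible_players)
--     s = set(possible_players)
--     nums = sorted(s)
--     starts = [v for v in nums if v - 1 not in s]
--     ends = [v for v in nums if v + 1 not in s]
--     return ", ".join(str(a) if a == b else f"{a}-{b}" for a, b in zip(starts, ends))
-- ===== Notes on version B (the rewrite author's own statement) =====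
-- stated objective: alternative
-- what changed: Replaces A's linear scan that compares each element to its predecessor by set-membership boundary detection: an element starts a run iff v-1 is not in the set and ends one iff v+1 is not, so the run endpoints are two independent filters zipped together (no run state carried through a scan).
import Mathlib
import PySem

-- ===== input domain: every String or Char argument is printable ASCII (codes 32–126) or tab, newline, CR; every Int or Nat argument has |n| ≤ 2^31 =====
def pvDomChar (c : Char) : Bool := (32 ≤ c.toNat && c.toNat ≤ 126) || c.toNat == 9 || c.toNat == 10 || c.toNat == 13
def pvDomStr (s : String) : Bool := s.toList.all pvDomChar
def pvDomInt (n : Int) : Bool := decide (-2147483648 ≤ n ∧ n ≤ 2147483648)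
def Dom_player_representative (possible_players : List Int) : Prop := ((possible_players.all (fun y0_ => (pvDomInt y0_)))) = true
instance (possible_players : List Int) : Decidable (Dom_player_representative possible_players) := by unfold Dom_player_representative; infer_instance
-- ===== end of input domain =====

-- B detects run boundaries by set membership (v starts a run iff v-1 ∉ set, ends one iff v+1 ∉ set)
-- and zips the two filtered lists, instead of A's stateful index scan comparing nums[i] to nums[i-1].

-- ===== PORT A =====
-- loop body of A's 'for i in range(1, len(nums) + 1)' (state: (result, start))
def pvBodyA (nums : List Int) (s : List String × Int) (i : Int) : List String × Int :=
  if i = (nums.length : Int) ∨ PySem.List.pyGetD nums i 0 ≠ PySem.List.pyGetD nums (i - 1) 0 + 1 then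
    ((s.1 ++ [if s.2 = PySem.List.pyGetD nums (i - 1) 0 then PySem.Int.toStr s.2
              else PySem.Int.toStr s.2 ++ "-" ++ PySem.Int.toStr (PySem.List.pyGetD nums (i - 1) 0)]),
     if i < (nums.length : Int) then PySem.List.pyGetD nums i 0 else s.2)
  else s

-- nums[0] on the empty list raises IndexError in Python; Pre_ excludes that input, so pyGetD's
-- default is never the value used.
def player_representative (possible_players : List Int) : String :=
  let nums := PySem.List.sorted (PySem.Set.ofList possible_players) (fun x => x) false
  let st := (PySem.List.pyRange 1 ((nums.length : Int) + 1) 1).foldl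
      (pvBodyA nums) ([], PySem.List.pyGetD nums 0 0)
  PySem.Str.join ", " st.1

-- ===== PORT B =====
def player_representative_alt (possible_players : List Int) : String :=
  let s := PySem.Set.ofList possible_players
  let nums := PySem.List.sorted s (fun x => x) false
  let starts := nums.filter (fun v => !(s.contains (v - 1)))
  let ends := nums.filter (fun v => !(s.contains (v + 1)))
  PySem.Str.join ", " ((starts.zip ends).map (fun r =>
    if r.1 = r.2 then PySem.Int.toStr r.1 else PySem.Int.toStr r.1 ++ "-" ++ PySem.Int.toStr r.2))

-- ===== PRECONDITION & SPEC =====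
-- Pre_ excludes only the empty list, on which A's 'nums[0]' raises IndexError.
def Pre_player_representative (possible_players : List Int) : Prop := possible_players ≠ []
instance (possible_players : List Int) : Decidable (Pre_player_representative possible_players) := by
  unfold Pre_player_representative; infer_instance

def pvWitness_player_representative : List Int := ([2, 3, 5, 3])

def Spec_player_representative (possible_players : List Int) (out : String) : Prop := out = player_representative_alt possible_players
instance (possible_players : List Int) (out : String) : Decidable (Spec_player_representative possible_players out) := by unfold Spec_player_representative; infer_instance

-- ===== CLAIM (what is proved, stated in full; the proofs are below) =====
def Claim_equal_player_representative : Prop := ∀ (possible_players : List Int), Dom_player_representative possible_players → Pre_player_representative possible_players → Spec_player_representative possible_players (player_representative possible_players)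

-- ===== LEMMAS AND PROOFS =====

-- the run list of a strictly increasing tail, as (start, end) pairs (proof device only)
def pvRuns (start prev : Int) : List Int → List (Int × Int)
  | [] => [(start, prev)]
  | v :: t => if v = prev + 1 then pvRuns start v t else (start, prev) :: pvRuns v v t

def pvFmt (r : Int × Int) : String :=
  if r.1 = r.2 then PySem.Int.toStr r.1 else PySem.Int.toStr r.1 ++ "-" ++ PySem.Int.toStr r.2

-- run starts strictly after the first element: v starts a run iff it does not extend prev
def pvStartsAux (p : Int) : List Int → List Int
  | [] => []
  | v :: t => if v = p + 1 then pvStartsAux v t else v :: pvStartsAux v t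

-- run ends: p ends its run iff the next value does not extend it
def pvEndsAux (p : Int) : List Int → List Int
  | [] => [p]
  | v :: t => if v = p + 1 then pvEndsAux v t else p :: pvEndsAux v t

theorem pvRuns_fst (t : List Int) : ∀ s p, (pvRuns s p t).map Prod.fst = s :: pvStartsAux p t := by
  induction t with
  | nil => intro s p; simp [pvRuns, pvStartsAux]
  | cons v t ih => intro s p; by_cases h : v = p + 1 <;> simp [pvRuns, pvStartsAux, h, ih]

theorem pvRuns_snd (t : List Int) : ∀ s p, (pvRuns s p t).map Prod.snd = pvEndsAux p t := by
  induction t with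
  | nil => intro s p; simp [pvRuns, pvEndsAux]
  | cons v t ih => intro s p; by_cases h : v = p + 1 <;> simp [pvRuns, pvEndsAux, h, ih]

-- in a strictly increasing list, v-1 is a member iff it is v's immediate predecessor p
theorem pv_mem_pred (nums pre t : List Int) (p v : Int)
    (hn : nums = pre ++ p :: v :: t) (h : nums.Pairwise (· < ·)) :
    (v - 1) ∈ nums ↔ p = v - 1 := by
  subst hn
  rw [List.pairwise_append] at h
  obtain ⟨-, hpv, hcross⟩ := h
  rw [List.pairwise_cons] at hpv
  obtain ⟨hp, hv⟩ := hpv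
  rw [List.pairwise_cons] at hv
  obtain ⟨hv, -⟩ := hv
  constructor
  · intro hm
    rcases List.mem_append.1 hm with hx | hx
    · have h1 := hcross _ hx p (by simp)
      have h2 := hp v (by simp)
      omega
    · rcases List.mem_cons.1 hx with h1 | hx
      · omega
      · rcases List.mem_cons.1 hx with h1 | hx
        · omega
        · have := hv _ hx; omega
  · intro hp'; subst hp'; simp

-- in a strictly increasing list, v+1 is a member iff it is v's immediate successor
theorem pv_mem_succ (nums pre t : List Int) (p v : Int)
    (hn : nums = pre ++ p :: v :: t) (h : nums.Pairwise (· < ·)) :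
    (p + 1) ∈ nums ↔ v = p + 1 := by
  subst hn
  rw [List.pairwise_append] at h
  obtain ⟨-, hpv, hcross⟩ := h
  rw [List.pairwise_cons] at hpv
  obtain ⟨hp, hv⟩ := hpv
  rw [List.pairwise_cons] at hv
  obtain ⟨hv, -⟩ := hv
  constructor
  · intro hm
    rcases List.mem_append.1 hm with hx | hx
    · have := hcross _ hx p (by simp); omega
    · rcases List.mem_cons.1 hx with h1 | hx
      · omega
      · rcases List.mem_cons.1 hx with h1 | hx
        · omega
        · have h1 := hv _ hx
          have h2 := hp v (by simp)
          omega
  · intro hv'; subst hv'; simp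

theorem pv_mem_succ_last (nums pre : List Int) (p : Int)
    (hn : nums = pre ++ [p]) (h : nums.Pairwise (· < ·)) : (p + 1) ∉ nums := by
  subst hn
  rw [List.pairwise_append] at h
  obtain ⟨-, -, hcross⟩ := h
  intro hm
  rcases List.mem_append.1 hm with hx | hx
  · have := hcross _ hx p (by simp); omega
  · simp at hx

-- B's starts-filter over the tail computes pvStartsAux
theorem pv_starts_filter (nums : List Int) (h : nums.Pairwise (· < ·)) :
    ∀ (t pre : List Int) (p : Int), nums = pre ++ p :: t →
      t.filter (fun v => !decide ((v - 1) ∈ nums)) = pvStartsAux p t := by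
  intro t
  induction t with
  | nil => intro pre p hn; simp [pvStartsAux]
  | cons v t ih =>
    intro pre p hn
    have hmem := pv_mem_pred nums pre t p v hn h
    have hrec := ih (pre ++ [p]) v (by simp [hn])
    rw [List.filter_cons]
    by_cases hp : p = v - 1
    · rw [if_neg (by simp [hmem, hp])]
      rw [hrec, pvStartsAux, if_pos (by omega)]
    · rw [if_pos (by simp [hmem, hp])]
      rw [hrec, pvStartsAux, if_neg (by omega)]

-- B's ends-filter computes pvEndsAux
theorem pv_ends_filter (nums : List Int) (h : nums.Pairwise (· < ·)) :
    ∀ (t pre : List Int) (p : Int), nums = pre ++ p :: t →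
      (p :: t).filter (fun v => !decide ((v + 1) ∈ nums)) = pvEndsAux p t := by
  intro t
  induction t with
  | nil =>
    intro pre p hn
    rw [List.filter_cons, if_pos (by simp [pv_mem_succ_last nums pre p hn h])]
    simp [pvEndsAux]
  | cons v t ih =>
    intro pre p hn
    have hmem := pv_mem_succ nums pre t p v hn h
    have hrec := ih (pre ++ [p]) v (by simp [hn])
    rw [List.filter_cons]
    by_cases hv : v = p + 1
    · rw [if_neg (by simp [hmem, hv]), hrec, pvEndsAux, if_pos hv]
    · rw [if_pos (by simp [hmem, hv]), hrec, pvEndsAux, if_neg hv]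

-- the head of a strictly increasing list never extends an earlier run
theorem pv_head_no_pred (y : Int) (t : List Int) (h : (y :: t).Pairwise (· < ·)) :
    (y - 1) ∉ y :: t := by
  rw [List.pairwise_cons] at h
  intro hm
  rcases List.mem_cons.1 hm with h1 | hx
  · omega
  · have := h.1 _ hx; omega

-- A's index loop from index k computes pvRuns of the suffix
theorem pvA_runs (m : Nat) : ∀ (nums : List Int) (k : Nat), 1 ≤ k → k + m = nums.length →
    ∀ (result : List String) (start : Int),
    ((PySem.List.pyRange (k : Int) ((nums.length : Int) + 1) 1).foldl (pvBodyA nums) (result, start)).1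
      = result ++ (pvRuns start (nums.getD (k - 1) 0) (nums.drop k)).map pvFmt := by
  induction m with
  | zero =>
    intro nums k hk hkm result start
    have hg : PySem.List.pyGetD nums ((k : Int) - 1) 0 = nums.getD (k - 1) 0 := by
      rw [show (k : Int) - 1 = ((k - 1 : Nat) : Int) by omega, PySem.List.pyGetD_natCast]
    rw [show ((nums.length : Int) + 1) = (k : Int) + 1 by omega, PySem.List.pyRange_one_singleton]
    simp only [List.foldl_cons, List.foldl_nil, pvBodyA]
    rw [if_pos (Or.inl (by omega))]
    have hdrop : nums.drop k = [] := List.drop_eq_nil_of_le (by omega)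
    simp [hg, hdrop, pvRuns, pvFmt, List.getD_eq_getElem?_getD]
  | succ m ih =>
    intro nums k hk hkm result start
    have hkn : k < nums.length := by omega
    rw [PySem.List.pyRange_one_cons (by omega : (k : Int) < (nums.length : Int) + 1)]
    rw [List.foldl_cons]
    have hd : nums.drop k = nums[k] :: nums.drop (k + 1) := (List.getElem_cons_drop hkn).symm
    have hgk : PySem.List.pyGetD nums (k : Int) 0 = nums[k] := by
      simp [PySem.List.pyGetD_natCast, List.getD_eq_getElem?_getD, hkn]
    have hgk1 : PySem.List.pyGetD nums ((k : Int) - 1) 0 = nums[k - 1]?.getD 0 := by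
      rw [show (k : Int) - 1 = ((k - 1 : Nat) : Int) by omega, PySem.List.pyGetD_natCast,
        List.getD_eq_getElem?_getD]
    have hne : ((k : Int) = (nums.length : Int)) = False := by simp; omega
    have hlt : ((k : Int) < (nums.length : Int)) = True := by simp; omega
    have hcast : ((k : Int) + 1) = ((k + 1 : Nat) : Int) := by omega
    by_cases h : nums[k] = nums[k - 1]?.getD 0 + 1
    · rw [show pvBodyA nums (result, start) (k : Int) = (result, start) by
        simp [pvBodyA, hne, hgk, hgk1, h]]
      rw [hcast, ih nums (k + 1) (by omega) (by omega) result start]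
      rw [hd]
      simp [pvRuns, h, show k + 1 - 1 = k by omega, List.getD_eq_getElem?_getD, hkn]
    · rw [show pvBodyA nums (result, start) (k : Int)
            = (result ++ [pvFmt (start, nums[k - 1]?.getD 0)], nums[k]) by
        simp [pvBodyA, hne, hgk, hgk1, hlt, h, pvFmt]]
      rw [hcast, ih nums (k + 1) (by omega) (by omega) _ _]
      rw [hd]
      simp [pvRuns, h, show k + 1 - 1 = k by omega, List.getD_eq_getElem?_getD, hkn,
        List.append_assoc]

theorem pv_sorted_ne_nil (possible_players : List Int) (h : possible_players ≠ []) :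
    PySem.List.sorted (PySem.Set.ofList possible_players) (fun x => x) false ≠ [] := by
  intro hnil
  rw [PySem.List.sorted_eq_nil_iff] at hnil
  rcases possible_players with _ | ⟨x, t⟩
  · exact h rfl
  · have : x ∈ PySem.Set.ofList (x :: t) := by
      rw [PySem.Set.mem_ofList]; exact List.mem_cons_self
    simp [hnil] at this

-- ===== VERDICT (by name: the statement is the Claim_ definition above) =====
theorem player_representative_spec : Claim_equal_player_representative := by
  intro pp _ hpre
  have hne := pv_sorted_ne_nil pp hpre
  have hpw : (PySem.List.sorted (PySem.Set.ofList pp) (fun x => x) false).Pairwise (· < ·) :=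
    PySem.List.sorted_ofList_pairwise_lt pp
  rcases hx : PySem.List.sorted (PySem.Set.ofList pp) (fun x => x) false with _ | ⟨y, t⟩
  · exact absurd hx hne
  rw [hx] at hpw
  unfold Spec_player_representative player_representative player_representative_alt
  simp only [hx]
  -- membership in pp is membership in the sorted list y :: t
  have hmm : ∀ v : Int, (v ∈ pp) ↔ (v ∈ y :: t) := by
    intro v
    rw [← hx, PySem.List.mem_sorted, PySem.Set.mem_ofList]
  -- A's side: the loop produces the formatted runs
  have hA := pvA_runs t.length (y :: t) 1 (by omega) (by simp; omega) []
      (PySem.List.pyGetD (y :: t) 0 0)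
  norm_num at hA ⊢
  rw [hA]
  congr 1
  simp only [hmm]
  -- B's side: the two filters are the run starts and ends
  have hstarts : (y :: t).filter (fun v => !decide ((v - 1) ∈ y :: t))
      = y :: pvStartsAux y t := by
    rw [List.filter_cons]
    rw [if_pos (by simp [pv_head_no_pred y t hpw])]
    exact congrArg _ (pv_starts_filter (y :: t) hpw t [] y rfl)
  have hends : (y :: t).filter (fun v => !decide ((v + 1) ∈ y :: t))
      = pvEndsAux y t := pv_ends_filter (y :: t) hpw t [] y rfl
  rw [hstarts, hends, ← pvRuns_fst t y y, ← pvRuns_snd t y y, List.zip_map']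
  simp [pvFmt]
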